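-- pv_equiv track=rewrite | github.com/bensonby/numberama | numberama-solver.py | check_consecutive_elimination
-- ===== SOURCE A (Python) =====
-- REMOVE_TOTAL = 10
--
-- def can_remove(grid, index1, index2):
--     if index1 == -1 or index2 == -1 or index1 >= len(grid) or index2 >= len(grid):
--         return False
--     value1 = grid[index1]
--     value2 = grid[index2]
--     return value1 + value2 == REMOVE_TOTAL or value1 == value2
--
-- def check_consecutive_elimination(grid):
--     moves = []
--     first_number_index = -1
--     second_number_index = -1
--     for i in range(0, len(grid)):
--         if grid[i] != 0:
--             first_number_index = second_number_index
--             second_number_index = i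
--             if can_remove(grid, first_number_index, second_number_index):
--                 moves.append((first_number_index, second_number_index))
--     return moves
-- ===== SOURCE B (Python) =====
-- def check_consecutive_elimination(grid):
--     # Backward pass: nxt[i] = (index, value) of the nearest non-zero cell after i, or None.
--     nxt = [None] * len(grid)
--     nz = None
--     for i in reversed(range(len(grid))):
--         nxt[i] = nz
--         if grid[i] != 0:
--             nz = (i, grid[i])
--     # Forward pass: pair each non-zero cell with its non-zero successor when they match.
--     return [(i, p[0]) for i, (v, p) in enumerate(zip(grid, nxt))
--             if v != 0 and p is not None and (v + p[1] == 10 or v == p[1])]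
-- ===== Notes on version B (the rewrite author's own statement) =====
-- stated objective: alternative
-- what changed: B replaces A's forward scan with running first/second indices by two passes: a backward pass building a successor array nxt[i] = nearest non-zero (index, value) after i, then a forward pass pairing each non-zero cell with its recorded successor; A's -1/bounds guards disappear.
import Mathlib
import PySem

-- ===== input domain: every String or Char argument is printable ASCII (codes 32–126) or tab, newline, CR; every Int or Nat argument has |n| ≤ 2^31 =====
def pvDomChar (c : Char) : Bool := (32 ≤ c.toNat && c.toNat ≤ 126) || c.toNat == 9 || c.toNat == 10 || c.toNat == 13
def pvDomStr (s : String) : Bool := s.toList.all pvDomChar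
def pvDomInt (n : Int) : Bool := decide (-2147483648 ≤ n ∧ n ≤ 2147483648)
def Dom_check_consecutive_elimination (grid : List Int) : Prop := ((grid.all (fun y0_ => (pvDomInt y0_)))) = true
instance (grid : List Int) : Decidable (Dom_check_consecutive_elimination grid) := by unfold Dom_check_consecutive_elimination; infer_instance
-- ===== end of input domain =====

-- B replaces A's forward stateful scan by a backward pass that records, for every cell,
-- its nearest non-zero successor, and a second pass pairing each non-zero cell with that
-- successor (objective: alternative decomposition, same cost).

-- ===== PORT A =====
def can_remove (grid : List Int) (index1 index2 : Int) : Bool :=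
  if index1 == -1 || index2 == -1 || index1 ≥ (grid.length : Int) || index2 ≥ (grid.length : Int) then
    false
  else
    let value1 := PySem.List.pyGetD grid index1 0
    let value2 := PySem.List.pyGetD grid index2 0
    value1 + value2 == 10 || value1 == value2

def check_consecutive_elimination (grid : List Int) : List (Int × Int) :=
  let st := (PySem.List.pyRange 0 grid.length 1).foldl
    (fun (s : Int × Int × List (Int × Int)) i =>
      if PySem.List.pyGetD grid i 0 != 0 then
        let first := s.2.1
        let second := i
        (first, second,
          if can_remove grid first second then s.2.2 ++ [(first, second)] else s.2.2)
      else s)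
    (-1, -1, [])
  st.2.2

-- ===== PORT B =====
def check_consecutive_elimination_alt (grid : List Int) : List (Int × Int) :=
  -- backward pass (Python: for i in reversed(range(len(grid)))), as a foldr over the
  -- enumerated list: nxt[i] = nearest non-zero (index, value) after i, or none
  let st := (PySem.List.enumerate grid 0).foldr
    (fun p (st : List (Option (Int × Int)) × Option (Int × Int)) =>
      (st.2 :: st.1, if p.2 != 0 then some (p.1, p.2) else st.2))
    ([], none)
  -- forward pass: the list comprehension over enumerate(zip(grid, nxt))
  (PySem.List.enumerate (grid.zip st.1) 0).filterMap (fun q =>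
    if q.2.1 != 0 then
      match q.2.2 with
      | some p => if q.2.1 + p.2 == 10 || q.2.1 == p.2 then some (q.1, p.1) else none
      | none => none
    else none)

-- ===== PRECONDITION & SPEC =====
def Spec_check_consecutive_elimination (grid : List Int) (out : List (Int × Int)) : Prop := out = check_consecutive_elimination_alt grid
instance (grid : List Int) (out : List (Int × Int)) : Decidable (Spec_check_consecutive_elimination grid out) := by unfold Spec_check_consecutive_elimination; infer_instance

-- ===== CLAIM (what is proved, stated in full; the proofs are below) =====
def Claim_equal_check_consecutive_elimination : Prop := ∀ (grid : List Int), Dom_check_consecutive_elimination grid → Spec_check_consecutive_elimination grid (check_consecutive_elimination grid)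

-- ===== LEMMAS AND PROOFS =====

-- the non-zero (index, value) pairs of a list (from offset s), and the adjacent-pair scan,
-- used as the common characterisation of both ports
def pvNZs (xs : List Int) (s : Int) : List (Int × Int) :=
  (PySem.List.enumerate xs s).filter (fun p => p.2 != 0)

def pvNZ (xs : List Int) : List (Int × Int) :=
  (PySem.List.enumerate xs 0).filter (fun p => p.2 != 0)

def pvPairs (l : List (Int × Int)) : List (Int × Int) :=
  (l.zip l.tail).filterMap (fun q =>
    if q.1.2 + q.2.2 == 10 || q.1.2 == q.2.2 then some (q.1.1, q.2.1) else none)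

def pvLastI (l : List (Int × Int)) : Int := (l.getLast?.map (·.1)).getD (-1)

-- ---------- A-side: the forward scan computes pvPairs (pvNZ grid) ----------

-- adjacent pairs of a snoc
lemma pvZipTail (y : Int × Int) (l : List (Int × Int)) (x : Int × Int) :
    ((y :: l) ++ [x]).zip (((y :: l) ++ [x]).tail)
      = (y :: l).zip l ++ [((y :: l).getLast (by simp), x)] := by
  induction l generalizing y with
  | nil => simp
  | cons z l ih =>
      have h := ih z
      simp only [List.cons_append, List.tail_cons, List.zip_cons_cons] at h ⊢
      rw [h]
      simp [List.getLast]

lemma pvPairs_append (l : List (Int × Int)) (x : Int × Int) (h : l ≠ []) :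
    pvPairs (l ++ [x]) = pvPairs l ++
      (if (l.getLast h).2 + x.2 == 10 || (l.getLast h).2 == x.2
        then [((l.getLast h).1, x.1)] else []) := by
  obtain ⟨y, l', rfl⟩ := List.exists_cons_of_ne_nil h
  unfold pvPairs
  rw [pvZipTail, List.filterMap_append]
  simp only [List.tail_cons, List.filterMap]
  split_ifs <;> simp_all

lemma pvNZ_take_succ (grid : List Int) (n : Nat) (hn : n < grid.length) :
    pvNZ (grid.take (n + 1)) = pvNZ (grid.take n) ++
      (if grid[n] != 0 then [((n : Int), grid[n])] else []) := by
  have ht : grid.take (n + 1) = grid.take n ++ [grid[n]] := by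
    rw [List.take_add_one, List.getElem?_eq_getElem hn]; rfl
  unfold pvNZ
  rw [ht, PySem.List.enumerate_append, List.filter_append]
  have hlen : ((grid.take n).length : Int) = (n : Int) := by
    simp [List.length_take, Nat.min_eq_left (le_of_lt hn)]
  rw [hlen]
  congr 1
  by_cases hz : grid[n] = 0 <;>
    simp [PySem.List.enumerate_cons, PySem.List.enumerate_nil, hz]

lemma pvNZ_mem (grid : List Int) (n : Nat) (hn : n ≤ grid.length) :
    ∀ p ∈ pvNZ (grid.take n), ∃ (k : Nat) (h : k < grid.length),
      k < n ∧ p = ((k : Int), grid[k]) ∧ grid[k] ≠ 0 := by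
  intro p hp
  unfold pvNZ at hp
  rw [List.mem_filter] at hp
  obtain ⟨hmem, hnz⟩ := hp
  rw [PySem.List.mem_enumerate_iff] at hmem
  obtain ⟨k, hk, rfl⟩ := hmem
  rw [List.length_take] at hk
  have hk' : k < grid.length := by omega
  refine ⟨k, hk', by omega, by simp [List.getElem_take], ?_⟩
  simp only [List.getElem_take] at hnz ⊢
  simpa using hnz

-- the loop invariant: after processing indices [0, n), A's state is
-- (index of second-to-last non-zero so far, index of last non-zero so far, B-style pairs)
lemma pvInv (grid : List Int) : ∀ (n : Nat), n ≤ grid.length →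
    (PySem.List.pyRange 0 (n : Int) 1).foldl
      (fun (s : Int × Int × List (Int × Int)) i =>
        if PySem.List.pyGetD grid i 0 != 0 then
          (s.2.1, i,
            if can_remove grid s.2.1 i then s.2.2 ++ [(s.2.1, i)] else s.2.2)
        else s)
      (-1, -1, [])
    = (pvLastI (pvNZ (grid.take n)).dropLast, pvLastI (pvNZ (grid.take n)),
        pvPairs (pvNZ (grid.take n))) := by
  intro n
  induction n with
  | zero => intro _; simp [PySem.List.pyRange_one_eq_nil, pvNZ, pvPairs, pvLastI,
      PySem.List.enumerate_nil]
  | succ n ih =>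
      intro hn
      have hn' : n < grid.length := hn
      have hcast : ((n + 1 : Nat) : Int) = (n : Int) + 1 := by push_cast; ring
      rw [hcast, PySem.List.pyRange_one_succ_right (by positivity), List.foldl_append,
        ih (le_of_lt hn')]
      simp only [List.foldl_cons, List.foldl_nil]
      have hget : PySem.List.pyGetD grid (n : Int) 0 = grid[n] := by
        rw [PySem.List.pyGetD_natCast, List.getD_eq_getElem _ _ hn']
      rw [pvNZ_take_succ grid n hn', hget]
      by_cases hz : grid[n] = 0
      · simp [hz]
      · have hznz : (grid[n] != 0) = true := by simpa using hz
        simp only [hznz, if_pos]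
        set l := pvNZ (grid.take n) with hl
        rcases eq_or_ne l [] with hle | hlne
        · have : can_remove grid (pvLastI l) (n : Int) = false := by
            rw [hle]; simp [pvLastI, can_remove]
          rw [this]
          simp [hle, pvLastI, pvPairs]
        · obtain ⟨k, hkl, hkn, hpk, hknz⟩ :=
            pvNZ_mem grid n (le_of_lt hn') (l.getLast hlne) (List.getLast_mem hlne)
          have hlast? : l.getLast? = some (l.getLast hlne) := List.getLast?_eq_some_getLast hlne
          have hfirst : pvLastI l = (k : Int) := by
            rw [pvLastI, hlast?, hpk]; rfl
          have hcr : can_remove grid (pvLastI l) (n : Int)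
              = (grid[k] + grid[n] == 10 || grid[k] == grid[n]) := by
            rw [hfirst]
            unfold can_remove
            rw [if_neg (by simp only [Bool.or_eq_true, beq_iff_eq, decide_eq_true_eq, not_or,
              ge_iff_le, not_le]; omega)]
            have hg1 : PySem.List.pyGetD grid (k : Int) 0 = grid[k] := by
              rw [PySem.List.pyGetD_natCast, List.getD_eq_getElem _ _ hkl]
            simp [hg1, hget]
          have hpair := pvPairs_append l ((n : Int), grid[n]) hlne
          rw [hpk] at hpair
          rw [hfirst] at hcr
          rw [hfirst, hcr, hpair]
          simp only [Prod.mk.injEq]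
          refine ⟨?_, ?_, ?_⟩
          · simp [pvLastI, hlast?, hpk]
          · simp [pvLastI]
          · split_ifs with hcond <;> simp_all

-- ---------- B-side: the two passes also compute pvPairs (pvNZ grid) ----------

lemma pvPairs_cons (a : Int × Int) (l : List (Int × Int)) :
    pvPairs (a :: l)
      = (match l.head? with
          | some b => if a.2 + b.2 == 10 || a.2 == b.2 then [(a.1, b.1)] else []
          | none => []) ++ pvPairs l := by
  cases l with
  | nil => simp [pvPairs]
  | cons b l' =>
      simp only [pvPairs, List.tail_cons, List.zip_cons_cons, List.filterMap_cons,
        List.head?_cons]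
      split_ifs <;> simp_all

-- the backward fold's invariant: its second component is the first non-zero (index, value)
-- pair, and the forward pass over the successor list yields the adjacent-pair scan
lemma pvBInv (xs : List Int) : ∀ (s : Int),
    ((PySem.List.enumerate xs s).foldr
        (fun p (st : List (Option (Int × Int)) × Option (Int × Int)) =>
          (st.2 :: st.1, if p.2 != 0 then some (p.1, p.2) else st.2))
        ([], none)).2 = (pvNZs xs s).head? ∧
    (PySem.List.enumerate (xs.zip ((PySem.List.enumerate xs s).foldr
        (fun p (st : List (Option (Int × Int)) × Option (Int × Int)) =>
          (st.2 :: st.1, if p.2 != 0 then some (p.1, p.2) else st.2))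
        ([], none)).1) s).filterMap (fun q =>
      if q.2.1 != 0 then
        match q.2.2 with
        | some p => if q.2.1 + p.2 == 10 || q.2.1 == p.2 then some (q.1, p.1) else none
        | none => none
      else none)
      = pvPairs (pvNZs xs s) := by
  induction xs with
  | nil =>
      intro s
      simp [PySem.List.enumerate_nil, pvNZs, pvPairs]
  | cons x xs ih =>
      intro s
      obtain ⟨ih1, ih2⟩ := ih (s + 1)
      rw [PySem.List.enumerate_cons]
      simp only [List.foldr_cons]
      have hnzs : pvNZs (x :: xs) s
          = (if x != 0 then [(s, x)] else []) ++ pvNZs xs (s + 1) := by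
        unfold pvNZs
        rw [PySem.List.enumerate_cons, List.filter_cons]
        split_ifs <;> simp_all
      constructor
      · by_cases hx : x = 0
        · simpa [hnzs, hx] using ih1
        · simp [hnzs, hx]
      · rw [List.zip_cons_cons, PySem.List.enumerate_cons, List.filterMap_cons]
        by_cases hx : x = 0
        · simpa [hnzs, hx] using ih2
        · have hx' : (x != 0) = true := by simpa using hx
          rw [hnzs]
          simp only [hx', if_pos, List.singleton_append, pvPairs_cons, ih1, ih2]
          cases hh : (pvNZs xs (s + 1)).head? with
          | none => simp
          | some b =>
              simp only []
              split_ifs with hc <;> simp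

-- ===== VERDICT (by name: the statement is the Claim_ definition above) =====
theorem check_consecutive_elimination_spec : Claim_equal_check_consecutive_elimination := by
  intro grid _
  unfold Spec_check_consecutive_elimination check_consecutive_elimination
    check_consecutive_elimination_alt
  have hA := pvInv grid grid.length le_rfl
  simp only [List.take_length] at hA
  rw [hA]
  have hB := (pvBInv grid 0).2
  simp only []
  rw [hB]
  rfl
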